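-- pv_equiv track=rewrite | github.com/lrslab/mtasemotif | mtase_motif/motifs.py | matches_iupac_sequence
-- ===== SOURCE A (Python) =====
-- IUPAC_TO_BASES: dict[str, set[str]] = {
--     "A": {"A"},
--     "C": {"C"},
--     "G": {"G"},
--     "T": {"T"},
--     "U": {"T"},
--     "R": {"A", "G"},
--     "Y": {"C", "T"},
--     "S": {"G", "C"},
--     "W": {"A", "T"},
--     "K": {"G", "T"},
--     "M": {"A", "C"},
--     "B": {"C", "G", "T"},
--     "D": {"A", "G", "T"},
--     "H": {"A", "C", "T"},
--     "V": {"A", "C", "G"},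
--     "N": {"A", "C", "G", "T"},
-- }
--
-- def normalize_iupac(seq: str) -> str:
--     out: list[str] = []
--     for ch in seq.upper():
--         if ch in IUPAC_TO_BASES:
--             out.append(ch)
--         elif ch in {"^", "/", "(", ")", "[", "]", "{", "}", "-", "_"}:
--             continue
--         elif ch.isspace():
--             continue
--         else:
--             out.append("N")
--     return "".join(out)
--
-- def matches_iupac_sequence(seq: str, motif_iupac: str) -> bool:
--     seq_norm = seq.upper().replace("U", "T")
--     motif_norm = normalize_iupac(motif_iupac)
--     if len(seq_norm) != len(motif_norm):
--         return False
--     for base, sym in zip(seq_norm, motif_norm):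
--         if base not in IUPAC_TO_BASES.get(sym, IUPAC_TO_BASES["N"]):
--             return False
--     return True
-- ===== SOURCE B (Python) =====
-- import re
--
-- _CLASS = {
--     "A": "A", "C": "C", "G": "G", "T": "T", "U": "T",
--     "R": "[AG]", "Y": "[CT]", "S": "[GC]", "W": "[AT]", "K": "[GT]", "M": "[AC]",
--     "B": "[CGT]", "D": "[AGT]", "H": "[ACT]", "V": "[ACG]", "N": "[ACGT]",
-- }
--
-- def matches_iupac_sequence(seq: str, motif_iupac: str) -> bool:
--     # Compile the motif to a regex of literals and character classes and let
--     # fullmatch do both the length check and the per-position membership test.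
--     s = seq.upper().replace("U", "T")
--     pattern = "".join(
--         _CLASS.get(ch, "[ACGT]")
--         for ch in motif_iupac.upper()
--         if not (ch in "^/()[]{}-_" or ch.isspace())
--     )
--     return re.fullmatch(pattern, s) is not None
-- ===== Notes on version B (the rewrite author's own statement) =====
-- stated objective: idiomatic
-- what changed: A normalizes the motif into an IUPAC string, compares lengths, then runs a zip loop testing each base against a dict-of-sets; B compiles the motif into a regex of literals and character classes ('R'->'[AG]', unknown->'[ACGT]') and delegates both the length check and the per-position membership test to re.fullmatch.
import Mathlib
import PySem

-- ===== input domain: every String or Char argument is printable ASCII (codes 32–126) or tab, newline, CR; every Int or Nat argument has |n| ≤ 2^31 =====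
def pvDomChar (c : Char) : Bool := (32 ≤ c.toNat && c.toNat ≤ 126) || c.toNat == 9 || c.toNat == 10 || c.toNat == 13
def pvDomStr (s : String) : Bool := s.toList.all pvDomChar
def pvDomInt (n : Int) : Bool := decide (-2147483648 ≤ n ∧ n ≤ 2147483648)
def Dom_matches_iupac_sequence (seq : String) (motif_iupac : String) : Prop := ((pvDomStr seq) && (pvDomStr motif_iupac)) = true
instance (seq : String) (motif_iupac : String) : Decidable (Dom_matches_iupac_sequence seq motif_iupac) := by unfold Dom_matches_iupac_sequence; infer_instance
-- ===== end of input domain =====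

-- B compiles the motif into a regex of literals and character classes and delegates the
-- length check and per-position membership test to a fullmatch (idiomatic; not faster).

-- ===== PORT A =====
def IUPAC_TO_BASES : PySem.Dict Char (PySem.Set Char) := PySem.Dict.ofList
  [('A', PySem.Set.ofList ['A']), ('C', PySem.Set.ofList ['C']),
   ('G', PySem.Set.ofList ['G']), ('T', PySem.Set.ofList ['T']),
   ('U', PySem.Set.ofList ['T']), ('R', PySem.Set.ofList ['A','G']),
   ('Y', PySem.Set.ofList ['C','T']), ('S', PySem.Set.ofList ['G','C']),
   ('W', PySem.Set.ofList ['A','T']), ('K', PySem.Set.ofList ['G','T']),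
   ('M', PySem.Set.ofList ['A','C']), ('B', PySem.Set.ofList ['C','G','T']),
   ('D', PySem.Set.ofList ['A','G','T']), ('H', PySem.Set.ofList ['A','C','T']),
   ('V', PySem.Set.ofList ['A','C','G']), ('N', PySem.Set.ofList ['A','C','G','T'])]

def normalize_iupac (seq : String) : String :=
  String.ofList ((PySem.Chars.upper seq.toList).foldl (fun out ch =>
    if (PySem.Dict.get? IUPAC_TO_BASES ch).isSome then out ++ [ch]
    else if PySem.Set.contains (PySem.Set.ofList ['^','/','(',')','[',']','{','}','-','_']) ch then out
    else if PySem.Chars.isspace ch then out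
    else out ++ ['N']) [])

def matches_iupac_sequence (seq : String) (motif_iupac : String) : Bool :=
  let seq_norm := PySem.Chars.replace (PySem.Chars.upper seq.toList) ['U'] ['T']
  let motif_norm := (normalize_iupac motif_iupac).toList
  if seq_norm.length ≠ motif_norm.length then false
  else (seq_norm.zip motif_norm).all (fun p =>
    PySem.Set.contains (PySem.Dict.getD IUPAC_TO_BASES p.2 (PySem.Dict.getD IUPAC_TO_BASES 'N' [])) p.1)

-- ===== PORT B =====
-- Source B's _CLASS table: each IUPAC symbol's regex fragment (a literal or a character class).
def reCLASS : PySem.Dict Char (List Char) := PySem.Dict.ofList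
  [('A', ['A']), ('C', ['C']), ('G', ['G']), ('T', ['T']), ('U', ['T']),
   ('R', ['[','A','G',']']), ('Y', ['[','C','T',']']), ('S', ['[','G','C',']']),
   ('W', ['[','A','T',']']), ('K', ['[','G','T',']']), ('M', ['[','A','C',']']),
   ('B', ['[','C','G','T',']']), ('D', ['[','A','G','T',']']),
   ('H', ['[','A','C','T',']']), ('V', ['[','A','C','G',']']),
   ('N', ['[','A','C','G','T',']'])]

-- Hand port of re.fullmatch, exact on the patterns Source B generates: a flat sequence of
-- literal characters and simple '[...]' character classes (no quantifiers or escapes).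
def reFullmatch (pat : List Char) (s : List Char) : Bool :=
  match pat with
  | [] => s.isEmpty
  | c :: rest =>
    if c = '[' then
      let cls := rest.takeWhile (fun x => x ≠ ']')
      let rest' := (rest.dropWhile (fun x => x ≠ ']')).drop 1
      match s with
      | [] => false
      | b :: bs => cls.contains b && reFullmatch rest' bs
    else
      match s with
      | [] => false
      | b :: bs => (c == b) && reFullmatch rest bs
termination_by pat.length
decreasing_by
  · simp only [List.length_cons]
    have h1 := List.length_dropWhile_le (fun x => decide (x ≠ ']')) rest
    have h2 : ((rest.dropWhile (fun x => decide (x ≠ ']'))).drop 1).length ≤ (rest.dropWhile (fun x => decide (x ≠ ']'))).length := by simp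
    omega
  · simp

def matches_iupac_sequence_alt (seq : String) (motif_iupac : String) : Bool :=
  let s := PySem.Chars.replace (PySem.Chars.upper seq.toList) ['U'] ['T']
  let pattern := (PySem.Chars.upper motif_iupac.toList).foldl (fun acc ch =>
    if (['^','/','(',')','[',']','{','}','-','_'].contains ch) || PySem.Chars.isspace ch
    then acc else acc ++ PySem.Dict.getD reCLASS ch ['[','A','C','G','T',']']) []
  reFullmatch pattern s

-- ===== PRECONDITION & SPEC =====
def Spec_matches_iupac_sequence (seq : String) (motif_iupac : String) (out : Bool) : Prop := out = matches_iupac_sequence_alt seq motif_iupac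
instance (seq : String) (motif_iupac : String) (out : Bool) : Decidable (Spec_matches_iupac_sequence seq motif_iupac out) := by unfold Spec_matches_iupac_sequence; infer_instance

-- ===== CLAIM (what is proved, stated in full; the proofs are below) =====
def Claim_equal_matches_iupac_sequence : Prop := ∀ (seq : String) (motif_iupac : String), Dom_matches_iupac_sequence seq motif_iupac → Spec_matches_iupac_sequence seq motif_iupac (matches_iupac_sequence seq motif_iupac)

-- ===== LEMMAS AND PROOFS =====

-- A's normalize-fold body as a per-character list
def fA (ch : Char) : List Char :=
  if (PySem.Dict.get? IUPAC_TO_BASES ch).isSome then [ch]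
  else if PySem.Set.contains (PySem.Set.ofList ['^','/','(',')','[',']','{','}','-','_']) ch then []
  else if PySem.Chars.isspace ch then []
  else ['N']

-- B's pattern-fold body as a per-character list
def skipB (ch : Char) : Bool :=
  (['^','/','(',')','[',']','{','}','-','_'].contains ch) || PySem.Chars.isspace ch

def chunkB (ch : Char) : List Char :=
  if skipB ch then [] else PySem.Dict.getD reCLASS ch ['[','A','C','G','T',']']

def okA (p : Char × Char) : Bool :=
  PySem.Set.contains (PySem.Dict.getD IUPAC_TO_BASES p.2 (PySem.Dict.getD IUPAC_TO_BASES 'N' [])) p.1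

lemma normalize_eq_flatMap (cs : List Char) :
    (cs.foldl (fun out ch =>
      if (PySem.Dict.get? IUPAC_TO_BASES ch).isSome then out ++ [ch]
      else if PySem.Set.contains (PySem.Set.ofList ['^','/','(',')','[',']','{','}','-','_']) ch then out
      else if PySem.Chars.isspace ch then out
      else out ++ ['N']) []) = cs.flatMap fA := by
  have h := PySem.List.foldl_append_eq_flatMap (l := cs) (g := fA) (acc := [])
  simp only [List.nil_append] at h
  rw [← h]
  apply PySem.List.foldl_congr_mem
  intro acc ch _
  simp [fA]
  split_ifs <;> simp

lemma pattern_eq_flatMap (cs : List Char) :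
    (cs.foldl (fun acc ch =>
      if (['^','/','(',')','[',']','{','}','-','_'].contains ch) || PySem.Chars.isspace ch
      then acc else acc ++ PySem.Dict.getD reCLASS ch ['[','A','C','G','T',']']) []) = cs.flatMap chunkB := by
  have h := PySem.List.foldl_append_eq_flatMap (l := cs) (g := chunkB) (acc := [])
  simp only [List.nil_append] at h
  rw [← h]
  apply PySem.List.foldl_congr_mem
  intro acc ch _
  simp [chunkB, skipB]
  split_ifs <;> simp

lemma keys_IUPAC : PySem.Dict.keys IUPAC_TO_BASES = ['A','C','G','T','U','R','Y','S','W','K','M','B','D','H','V','N'] := by decide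

lemma mem_keys_of_isSome (ch : Char) (h : (PySem.Dict.get? IUPAC_TO_BASES ch).isSome) :
    ch ∈ (['A','C','G','T','U','R','Y','S','W','K','M','B','D','H','V','N'] : List Char) := by
  rw [← keys_IUPAC]
  by_contra hm
  rw [(PySem.Dict.get?_eq_none_iff_not_mem_keys _ _).mpr hm] at h
  simp at h

lemma key_not_skip (ch : Char) (h : (PySem.Dict.get? IUPAC_TO_BASES ch).isSome) : skipB ch = false := by
  have hk := mem_keys_of_isSome ch h
  fin_cases hk <;> decide

lemma hset_specials (ch : Char) :
    (PySem.Set.ofList ['^','/','(',')','[',']','{','}','-','_']).contains ch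
    = (['^','/','(',')','[',']','{','}','-','_'] : List Char).contains ch := by
  rw [show PySem.Set.ofList ['^','/','(',')','[',']','{','}','-','_']
      = (['^','/','(',')','[',']','{','}','-','_'] : List Char) from by decide]
  rfl

lemma fA_of_skip (ch : Char) (h : skipB ch = true) : fA ch = [] := by
  have hk : (PySem.Dict.get? IUPAC_TO_BASES ch).isSome = false := by
    cases hh : (PySem.Dict.get? IUPAC_TO_BASES ch).isSome
    · rfl
    · rw [key_not_skip ch hh] at h; exact absurd h (by simp)
  simp only [fA, hk, Bool.false_eq_true, if_false]
  simp only [skipB, Bool.or_eq_true] at h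
  simp only [hset_specials]
  by_cases hc : (['^','/','(',')','[',']','{','}','-','_'] : List Char).contains ch = true
  · rw [if_pos hc]
  · rw [if_neg hc]
    rcases h with h | h
    · exact absurd h hc
    · rw [if_pos h]

lemma fA_of_not_skip (ch : Char) (h : skipB ch = false) :
    fA ch = [if (PySem.Dict.get? IUPAC_TO_BASES ch).isSome then ch else 'N'] := by
  simp only [skipB, Bool.or_eq_false_iff] at h
  obtain ⟨h1, h2⟩ := h
  simp only [fA, hset_specials, h1, h2, Bool.false_eq_true, if_false]
  split_ifs <;> rfl

-- evaluated chunks and base tests for the sixteen IUPAC symbols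
@[simp] lemma chvA : chunkB 'A' = (['A'] : List Char) := by decide
@[simp] lemma okvA (b : Char) : okA (b, 'A') = ((['A'] : List Char)).contains b := rfl
@[simp] lemma chvC : chunkB 'C' = (['C'] : List Char) := by decide
@[simp] lemma okvC (b : Char) : okA (b, 'C') = ((['C'] : List Char)).contains b := rfl
@[simp] lemma chvG : chunkB 'G' = (['G'] : List Char) := by decide
@[simp] lemma okvG (b : Char) : okA (b, 'G') = ((['G'] : List Char)).contains b := rfl
@[simp] lemma chvT : chunkB 'T' = (['T'] : List Char) := by decide
@[simp] lemma okvT (b : Char) : okA (b, 'T') = ((['T'] : List Char)).contains b := rfl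
@[simp] lemma chvU : chunkB 'U' = (['T'] : List Char) := by decide
@[simp] lemma okvU (b : Char) : okA (b, 'U') = ((['T'] : List Char)).contains b := rfl
@[simp] lemma chvR : chunkB 'R' = (['[','A','G',']'] : List Char) := by decide
@[simp] lemma okvR (b : Char) : okA (b, 'R') = ((['A','G'] : List Char)).contains b := rfl
@[simp] lemma chvY : chunkB 'Y' = (['[','C','T',']'] : List Char) := by decide
@[simp] lemma okvY (b : Char) : okA (b, 'Y') = ((['C','T'] : List Char)).contains b := rfl
@[simp] lemma chvS : chunkB 'S' = (['[','G','C',']'] : List Char) := by decide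
@[simp] lemma okvS (b : Char) : okA (b, 'S') = ((['G','C'] : List Char)).contains b := rfl
@[simp] lemma chvW : chunkB 'W' = (['[','A','T',']'] : List Char) := by decide
@[simp] lemma okvW (b : Char) : okA (b, 'W') = ((['A','T'] : List Char)).contains b := rfl
@[simp] lemma chvK : chunkB 'K' = (['[','G','T',']'] : List Char) := by decide
@[simp] lemma okvK (b : Char) : okA (b, 'K') = ((['G','T'] : List Char)).contains b := rfl
@[simp] lemma chvM : chunkB 'M' = (['[','A','C',']'] : List Char) := by decide
@[simp] lemma okvM (b : Char) : okA (b, 'M') = ((['A','C'] : List Char)).contains b := rfl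
@[simp] lemma chvB : chunkB 'B' = (['[','C','G','T',']'] : List Char) := by decide
@[simp] lemma okvB (b : Char) : okA (b, 'B') = ((['C','G','T'] : List Char)).contains b := rfl
@[simp] lemma chvD : chunkB 'D' = (['[','A','G','T',']'] : List Char) := by decide
@[simp] lemma okvD (b : Char) : okA (b, 'D') = ((['A','G','T'] : List Char)).contains b := rfl
@[simp] lemma chvH : chunkB 'H' = (['[','A','C','T',']'] : List Char) := by decide
@[simp] lemma okvH (b : Char) : okA (b, 'H') = ((['A','C','T'] : List Char)).contains b := rfl
@[simp] lemma chvV : chunkB 'V' = (['[','A','C','G',']'] : List Char) := by decide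
@[simp] lemma okvV (b : Char) : okA (b, 'V') = ((['A','C','G'] : List Char)).contains b := rfl
@[simp] lemma chvNN : chunkB 'N' = (['[','A','C','G','T',']'] : List Char) := by decide
@[simp] lemma okvNN (b : Char) : okA (b, 'N') = ((['A','C','G','T'] : List Char)).contains b := rfl

-- the behaviour of B's matcher on one emitted chunk followed by the rest of the pattern
lemma chunk_step (ch : Char) (hns : skipB ch = false) (rest : List Char) (s : List Char) :
    reFullmatch (chunkB ch ++ rest) s =
      match s with
      | [] => false
      | b :: bs => okA (b, if (PySem.Dict.get? IUPAC_TO_BASES ch).isSome then ch else 'N')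
                    && reFullmatch rest bs := by
  by_cases hk : (PySem.Dict.get? IUPAC_TO_BASES ch).isSome = true
  · rw [if_pos hk]
    have hmem := mem_keys_of_isSome ch hk
    fin_cases hmem <;>
      cases s with
      | nil => simp [reFullmatch]
      | cons b bs => simp [reFullmatch, List.takeWhile, List.dropWhile, BEq.comm]; try rfl
  · simp only [Bool.not_eq_true] at hk
    have hnone : PySem.Dict.get? IUPAC_TO_BASES ch = none := by
      cases hg : PySem.Dict.get? IUPAC_TO_BASES ch
      · rfl
      · rw [hg] at hk; exact absurd hk (by simp)
    have hnk : ch ∉ PySem.Dict.keys IUPAC_TO_BASES :=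
      (PySem.Dict.get?_eq_none_iff_not_mem_keys _ _).mp hnone
    have hBc : PySem.Dict.contains reCLASS ch = false := by
      rw [PySem.Dict.contains_eq_isSome_get?]
      rw [(PySem.Dict.get?_eq_none_iff_not_mem_keys _ _).mpr (by
        rw [show PySem.Dict.keys reCLASS = ['A','C','G','T','U','R','Y','S','W','K','M','B','D','H','V','N'] from by decide]
        rw [keys_IUPAC] at hnk
        exact hnk)]
      rfl
    have hch : chunkB ch = ['[','A','C','G','T',']'] := by
      rw [chunkB, if_neg (by simp [hns]), PySem.Dict.getD_of_not_contains _ _ hBc]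
    rw [hch, if_neg (by simp [hk])]
    cases s with
    | nil => simp [reFullmatch]
    | cons b bs => simp [reFullmatch, List.takeWhile, List.dropWhile]; try rfl

-- main loop invariant: matcher over the compiled pattern = length check + zip-all over fA
lemma main_lemma (cs : List Char) : ∀ s : List Char,
    reFullmatch (cs.flatMap chunkB) s
    = (decide (s.length = (cs.flatMap fA).length) && (s.zip (cs.flatMap fA)).all okA) := by
  induction cs with
  | nil =>
    intro s
    cases s <;> simp [reFullmatch]
  | cons c cs ih =>
    intro s
    simp only [List.flatMap_cons]
    by_cases hs : skipB c = true
    · rw [show chunkB c = [] from by simp [chunkB, hs], fA_of_skip c hs,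
        List.nil_append, List.nil_append]
      exact ih s
    · have hs2 : skipB c = false := by simpa using hs
      rw [chunk_step c hs2 _ s, fA_of_not_skip c hs2]
      cases s with
      | nil => simp
      | cons b bs =>
        simp only [List.singleton_append, List.zip_cons_cons, List.all_cons, List.length_cons]
        rw [ih bs]
        simp only [Nat.add_right_cancel_iff]
        rw [Bool.and_left_comm]

-- ===== VERDICT (by name: the statement is the Claim_ definition above) =====
theorem matches_iupac_sequence_spec : Claim_equal_matches_iupac_sequence := by
  intro seq motif _
  unfold Spec_matches_iupac_sequence matches_iupac_sequence matches_iupac_sequence_alt normalize_iupac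
  rw [String.toList_ofList, normalize_eq_flatMap, pattern_eq_flatMap]
  rw [main_lemma]
  by_cases hl : (PySem.Chars.replace (PySem.Chars.upper seq.toList) ['U'] ['T']).length
      = ((PySem.Chars.upper motif.toList).flatMap fA).length
  · rw [if_neg (by simpa using hl)]
    rw [decide_eq_true hl, Bool.true_and]
    rfl
  · rw [if_pos (by simpa using hl)]
    rw [decide_eq_false hl, Bool.false_and]
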